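-- pv_equiv track=rewrite | github.com/Fremont-project/data-processing | pipeline/aimsun-data-analysis/analyser_utils.py | get_sorted_x_y
-- ===== SOURCE A (Python) =====
-- def get_sorted_x_y(x, y):
--     """
--     Given two sequences, sort the x,y pair ascendingly based on x.
--     This function is used to plot lines with incresing x.
--     @param x:               The array of x coordinates.
--     @param y:               The array of y coordinates.
--     @return:                The sorted array of x and y with ascending x.
--     """
--     sort_x_y = sorted((i,j) for i,j in zip(x,y))
--     X = []
--     Y = []
--     for i, j in sort_x_y:
--         X.append(i)
--         Y.append(j)
--     return X, Y
-- ===== SOURCE B (Python) =====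
-- def get_sorted_x_y(x, y):
--     """Top-down merge sort of the zipped pairs (lexicographic), then split."""
--     pairs = list(zip(x, y))
--     s = _msort(pairs)
--     return [p[0] for p in s], [p[1] for p in s]
--
--
-- def _msort(l):
--     if len(l) <= 1:
--         return l
--     mid = len(l) // 2
--     return _merge(_msort(l[:mid]), _msort(l[mid:]))
--
--
-- def _merge(a, b):
--     out = []
--     i = j = 0
--     while i < len(a) and j < len(b):
--         if b[j] < a[i]:
--             out.append(b[j])
--             j += 1
--         else:
--             out.append(a[i])
--             i += 1
--     return out + a[i:] + b[j:]
-- ===== Notes on version B (the rewrite author's own statement) =====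
-- stated objective: alternative
-- what changed: Instead of calling the library sort on the zipped pairs and unzipping with an append loop, B runs a hand-written top-down merge sort (recursive halving plus a two-pointer merge with the same lexicographic tuple comparison) and then splits the sorted pairs with two comprehensions; the lex order on pairs is total, so any correct sort yields the same list.
import Mathlib
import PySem

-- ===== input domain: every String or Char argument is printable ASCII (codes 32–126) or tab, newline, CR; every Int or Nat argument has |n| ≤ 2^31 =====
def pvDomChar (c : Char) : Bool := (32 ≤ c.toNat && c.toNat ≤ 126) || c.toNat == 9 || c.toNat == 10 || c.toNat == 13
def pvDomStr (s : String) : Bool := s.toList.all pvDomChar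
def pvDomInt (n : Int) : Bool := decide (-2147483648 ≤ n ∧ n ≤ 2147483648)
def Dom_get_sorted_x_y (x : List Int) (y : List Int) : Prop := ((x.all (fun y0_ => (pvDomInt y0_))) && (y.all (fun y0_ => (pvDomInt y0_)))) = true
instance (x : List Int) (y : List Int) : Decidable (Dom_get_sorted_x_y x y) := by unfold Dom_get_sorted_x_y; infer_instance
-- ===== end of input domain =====

-- B replaces A's library pair-sort + unzip loop with a hand-written top-down merge sort of the zipped pairs followed by two map passes (alternative algorithm, same asymptotic cost).


-- ===== PORT A =====
-- sorted((i,j) for i,j in zip(x,y)) : identity key on tuples = lexicographic tuple compare = sorted2 with fst/snd keys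
def get_sorted_x_y (x : List Int) (y : List Int) : List Int × List Int :=
  let sort_x_y := PySem.List.sorted2 (List.zip x y) Prod.fst Prod.snd
  sort_x_y.foldl (fun (acc : List Int × List Int) p => (acc.1 ++ [p.1], acc.2 ++ [p.2])) ([], [])

-- ===== PORT B =====
-- Python tuple comparison b[j] < a[i] (lexicographic on the pair)
def pvLtB (p q : Int × Int) : Bool := p.1 < q.1 || (p.1 == q.1 && p.2 < q.2)

-- the while loop of _merge: two-pointer merge, smaller (strictly) front of b first, else front of a
def pvMerge : List (Int × Int) → List (Int × Int) → List (Int × Int)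
  | [], b => b
  | a :: l, [] => a :: l
  | a :: l, b :: r =>
      if pvLtB b a then b :: pvMerge (a :: l) r else a :: pvMerge l (b :: r)
termination_by a b => a.length + b.length
decreasing_by all_goals simp

-- _msort: split at len//2, sort halves, merge
def pvMsort (l : List (Int × Int)) : List (Int × Int) :=
  if h : l.length ≤ 1 then l
  else pvMerge (pvMsort (l.take (l.length / 2))) (pvMsort (l.drop (l.length / 2)))
termination_by l.length
decreasing_by
  · simp; omega
  · simp; omega

def get_sorted_x_y_alt (x : List Int) (y : List Int) : List Int × List Int :=
  let pairs := List.zip x y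
  let s := pvMsort pairs
  (s.map Prod.fst, s.map Prod.snd)

-- ===== PRECONDITION & SPEC =====
def Spec_get_sorted_x_y (x : List Int) (y : List Int) (out : List Int × List Int) : Prop := out = get_sorted_x_y_alt x y
instance (x : List Int) (y : List Int) (out : List Int × List Int) : Decidable (Spec_get_sorted_x_y x y out) := by unfold Spec_get_sorted_x_y; infer_instance

-- ===== CLAIM (what is proved, stated in full; the proofs are below) =====
def Claim_equal_get_sorted_x_y : Prop := ∀ (x : List Int) (y : List Int), Dom_get_sorted_x_y x y → Spec_get_sorted_x_y x y (get_sorted_x_y x y)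

-- ===== LEMMAS AND PROOFS =====

-- the merge comparison is the strict lexicographic order on pairs
theorem pvLtB_iff (p q : Int × Int) : pvLtB p q = true ↔ toLex p < toLex q := by
  simp [pvLtB, Prod.Lex.lt_iff]

theorem pv_merge_perm (a b : List (Int × Int)) : (pvMerge a b).Perm (a ++ b) := by
  induction a, b using pvMerge.induct with
  | case1 b => simp [pvMerge]
  | case2 a l => simp [pvMerge]
  | case3 a l b r h ih =>
      rw [pvMerge, if_pos h]
      exact ((ih.cons b).trans (List.Perm.symm (List.perm_middle)))
  | case4 a l b r h ih =>
      rw [pvMerge, if_neg h]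
      exact ih.cons a

theorem pv_mem_merge (a b : List (Int × Int)) (p : Int × Int) :
    p ∈ pvMerge a b ↔ p ∈ a ∨ p ∈ b := by
  rw [(pv_merge_perm a b).mem_iff, List.mem_append]

theorem pv_merge_pairwise (a b : List (Int × Int))
    (ha : a.Pairwise (fun p q => toLex p ≤ toLex q))
    (hb : b.Pairwise (fun p q => toLex p ≤ toLex q)) :
    (pvMerge a b).Pairwise (fun p q => toLex p ≤ toLex q) := by
  induction a, b using pvMerge.induct with
  | case1 b => simpa [pvMerge] using hb
  | case2 a l => simpa [pvMerge] using ha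
  | case3 a l b r h ih =>
      rw [pvMerge, if_pos h]
      have hba : toLex b < toLex a := (pvLtB_iff b a).mp h
      rw [List.pairwise_cons]
      refine ⟨fun q hq => ?_, ih ha (List.Pairwise.of_cons hb)⟩
      rcases (pv_mem_merge _ _ _).mp hq with hql | hqr
      · rcases List.mem_cons.mp hql with rfl | hql
        · exact le_of_lt hba
        · exact le_of_lt (lt_of_lt_of_le hba ((List.pairwise_cons.mp ha).1 q hql))
      · exact (List.pairwise_cons.mp hb).1 q hqr
  | case4 a l b r h ih =>
      rw [pvMerge, if_neg h]
      have hab : toLex a ≤ toLex b := by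
        have := (pvLtB_iff b a).not.mp (by simpa using h)
        exact le_of_not_gt this
      rw [List.pairwise_cons]
      refine ⟨fun q hq => ?_, ih (List.Pairwise.of_cons ha) hb⟩
      rcases (pv_mem_merge _ _ _).mp hq with hql | hqr
      · exact (List.pairwise_cons.mp ha).1 q hql
      · rcases List.mem_cons.mp hqr with rfl | hqr
        · exact hab
        · exact hab.trans ((List.pairwise_cons.mp hb).1 q hqr)

theorem pv_msort_perm (l : List (Int × Int)) : (pvMsort l).Perm l := by
  induction l using pvMsort.induct with
  | case1 l h => rw [pvMsort, dif_pos h]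
  | case2 l h ih1 ih2 =>
      rw [pvMsort, dif_neg h]
      exact ((pv_merge_perm _ _).trans ((ih1.append ih2).trans
        (by rw [List.take_append_drop])))

theorem pv_msort_pairwise (l : List (Int × Int)) :
    (pvMsort l).Pairwise (fun p q => toLex p ≤ toLex q) := by
  induction l using pvMsort.induct with
  | case1 l h =>
      rw [pvMsort, dif_pos h]
      match l, h with
      | [], _ => simp
      | [a], _ => simp
  | case2 l h ih1 ih2 =>
      rw [pvMsort, dif_neg h]
      exact pv_merge_pairwise _ _ ih1 ih2

-- A side: inserting with a strict-less test keeps the list pairwise-≤ (in the lex order)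
theorem pv_insertBy_pairwise {κ : Type} [LinearOrder κ] (key : Int × Int → κ)
    (bf : Int × Int → Int × Int → Bool) (hbf : ∀ p q, bf p q = true ↔ key p < key q)
    (v : Int × Int) (l : List (Int × Int))
    (hl : l.Pairwise (fun p q => key p ≤ key q)) :
    (PySem.List.insertBy bf v l).Pairwise (fun p q => key p ≤ key q) := by
  induction l with
  | nil => simp [PySem.List.insertBy]
  | cons a t ih =>
      rw [PySem.List.insertBy]
      by_cases hb : bf v a = true
      · rw [if_pos hb]
        have hva : key v < key a := (hbf v a).mp hb
        rw [List.pairwise_cons]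
        refine ⟨fun q hq => ?_, hl⟩
        rcases List.mem_cons.mp hq with rfl | hq
        · exact le_of_lt hva
        · exact le_of_lt (lt_of_lt_of_le hva ((List.pairwise_cons.mp hl).1 q hq))
      · rw [if_neg hb]
        rw [List.pairwise_cons]
        refine ⟨fun q hq => ?_, ih (List.Pairwise.of_cons hl)⟩
        rcases (PySem.List.mem_insertBy bf v q t).mp hq with rfl | hq
        · exact le_of_not_gt ((hbf q a).not.mp (by simpa using hb))
        · exact (List.pairwise_cons.mp hl).1 q hq

theorem pv_foldl_insertBy_pairwise {κ : Type} [LinearOrder κ] (key : Int × Int → κ)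
    (bf : Int × Int → Int × Int → Bool) (hbf : ∀ p q, bf p q = true ↔ key p < key q)
    (l acc : List (Int × Int)) (hacc : acc.Pairwise (fun p q => key p ≤ key q)) :
    (l.foldl (fun acc x => PySem.List.insertBy bf x acc) acc).Pairwise
      (fun p q => key p ≤ key q) := by
  induction l generalizing acc with
  | nil => exact hacc
  | cons a t ih =>
      exact ih _ (pv_insertBy_pairwise key bf hbf a acc hacc)

theorem pv_sorted2_pairwise (l : List (Int × Int)) :
    (PySem.List.sorted2 l Prod.fst Prod.snd).Pairwise
      (fun p q => toLex p ≤ toLex q) := by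
  simp only [PySem.List.sorted2, if_neg (Bool.false_ne_true)]
  exact pv_foldl_insertBy_pairwise toLex _
    (fun p q => by
      simp only [Bool.or_eq_true, Bool.and_eq_true, Bool.not_eq_true',
        decide_eq_true_eq, decide_eq_false_iff_not, Prod.Lex.lt_iff, ofLex_toLex]
      omega)
    l [] (by simp)

-- the two sorts agree: both are pairwise-≤ rearrangements of zip x y under the (injective) lex key
theorem pv_sorted2_eq_msort (l : List (Int × Int)) :
    PySem.List.sorted2 l Prod.fst Prod.snd = pvMsort l := by
  refine PySem.List.eq_of_perm_of_pairwise_le_of_injective (fun p => toLex p)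
    (fun p q h => by simpa using congrArg ofLex h)
    ((PySem.List.sorted2_perm l Prod.fst Prod.snd false).trans (pv_msort_perm l).symm)
    (pv_sorted2_pairwise l) (pv_msort_pairwise l)

-- ===== VERDICT (by name: the statement is the Claim_ definition above) =====
theorem get_sorted_x_y_spec : Claim_equal_get_sorted_x_y := by
  intro x y _
  unfold Spec_get_sorted_x_y get_sorted_x_y get_sorted_x_y_alt
  rw [PySem.List.foldl_prod_mk (f := fun (a : List Int) (p : Int × Int) => a ++ [p.1])
      (g := fun (a : List Int) (p : Int × Int) => a ++ [p.2])]
  rw [PySem.List.foldl_append_singleton_eq_map, PySem.List.foldl_append_singleton_eq_map]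
  rw [pv_sorted2_eq_msort]
  simp
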